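-- pv_equiv track=rewrite | github.com/anna02272/Softverske-i-informacione-tehnologije | 1 godina/1 god 2 semestar/Algoritmi i strukture podataka/Vežbe/08 - Mapa, red sa prioritetom, algoritmi sortiranja/Resenja/SVE.py | brute_force_v2
-- ===== SOURCE A (Python) =====
-- def brute_force_v2(T, P):
--     """Funkcija vraća najmanji indeks teksta T
--     od kojeg počinje podstring P (u suprotnom -1)."""
--     n, m = len(T), len(P)                   # odredi dužine oba stringa
--     for i in range(n-m+1):                  # pokušaj za svaki potencijalni početni indeks u T
--         k = 0                               # indeks u šablonu P
--         while k < m and T[i + k] == P[k]:   # k-ti karakter P se podudara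
--             k += 1
--         if k == m:                          # ako smo došli do kraja šablona,
--             return i                        # podstring T[i:i+m] odgovara P
--     return -1                               # nije pronađeno nijedno poklapanje počevši od i
-- ===== SOURCE B (Python) =====
-- def brute_force_v2(T, P):
--     """Funkcija vraca najmanji indeks teksta T
--     od kojeg pocinje podstring P (u suprotnom -1)."""
--     return T.find(P)
-- ===== Notes on version B (the rewrite author's own statement) =====
-- stated objective: idiomatic
-- what changed: Replaces the hand-written quadratic index/while-loop scan with Python's built-in str.find, which returns the same smallest match index (or -1) via CPython's optimized C substring search.
import Mathlib
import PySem

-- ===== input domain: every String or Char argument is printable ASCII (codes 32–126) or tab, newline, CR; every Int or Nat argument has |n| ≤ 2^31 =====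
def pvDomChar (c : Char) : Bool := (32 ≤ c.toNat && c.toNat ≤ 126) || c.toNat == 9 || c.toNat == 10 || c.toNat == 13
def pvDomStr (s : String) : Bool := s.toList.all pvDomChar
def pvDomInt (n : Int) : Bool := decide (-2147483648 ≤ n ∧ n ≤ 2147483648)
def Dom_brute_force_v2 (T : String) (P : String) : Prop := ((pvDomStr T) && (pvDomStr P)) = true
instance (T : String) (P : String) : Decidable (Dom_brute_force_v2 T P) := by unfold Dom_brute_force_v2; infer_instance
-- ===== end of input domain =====

-- B replaces A's hand-written nested scan with the idiomatic one-liner T.find(P)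
-- (Python's built-in first-occurrence substring search); return values proved equal on all inputs.


-- ===== PORT A =====
-- inner 'while k < m and T[i + k] == P[k]: k += 1' (k is the state; indices are nonnegative)
def bfWhile (t p : List Char) (i : Nat) (k : Nat) : Nat :=
  if h : k < p.length ∧ PySem.List.pyGet? t ((i : Int) + (k : Int)) = PySem.List.pyGet? p (k : Int)
  then bfWhile t p i (k + 1)
  else k
termination_by p.length - k
decreasing_by omega

-- 'for i in range(n-m+1): … if k == m: return i' then 'return -1'
def bfOuter (t p : List Char) : List Nat → Int
  | [] => -1
  | i :: rest => if bfWhile t p i 0 = p.length then (i : Int) else bfOuter t p rest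

def brute_force_v2 (T : String) (P : String) : Int :=
  -- range(n-m+1): the candidate start indices are the naturals < n+1-m (empty when m > n)
  bfOuter T.toList P.toList (List.range (T.toList.length + 1 - P.toList.length))

-- ===== PORT B =====
def brute_force_v2_alt (T : String) (P : String) : Int :=
  PySem.Str.find T P          -- T.find(P)

-- ===== PRECONDITION & SPEC =====
def Spec_brute_force_v2 (T : String) (P : String) (out : Int) : Prop := out = brute_force_v2_alt T P
instance (T : String) (P : String) (out : Int) : Decidable (Spec_brute_force_v2 T P out) := by unfold Spec_brute_force_v2; infer_instance

-- ===== CLAIM (what is proved, stated in full; the proofs are below) =====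
def Claim_equal_brute_force_v2 : Prop := ∀ (T : String) (P : String), Dom_brute_force_v2 T P → Spec_brute_force_v2 T P (brute_force_v2 T P)

-- ===== LEMMAS AND PROOFS =====

-- the inner while loop reaches m iff every remaining position matches
theorem bfWhile_eq_iff (t p : List Char) (i : Nat) :
    ∀ k, bfWhile t p i k = p.length ↔
      (k ≤ p.length ∧ ∀ j, k ≤ j → j < p.length → t[i + j]? = p[j]?) := by
  intro k
  induction k using (fun motive ind k => Nat.strongRecOn
      (motive := fun d => ∀ k, p.length - k = d → motive k)
      (p.length - k) (fun d ih k hk => ind k (fun k' hk' => ih _ (by omega) k' rfl)) k rfl :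
      ∀ (motive : Nat → Prop), (∀ k, (∀ k', p.length - k' < p.length - k → motive k') → motive k) → _)
    with
  | _ k ih =>
  rw [bfWhile]
  by_cases h : k < p.length ∧ PySem.List.pyGet? t ((i : Int) + (k : Int)) = PySem.List.pyGet? p (k : Int)
  · rw [dif_pos h, ih (k+1) (by omega)]
    have hik : ((i : Int) + (k : Int)) = ((i + k : Nat) : Int) := by push_cast; ring
    rw [hik, PySem.List.pyGet?_natCast, PySem.List.pyGet?_natCast] at h
    constructor
    · rintro ⟨h1, h2⟩
      refine ⟨by omega, fun j hkj hjm => ?_⟩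
      rcases Nat.eq_or_lt_of_le hkj with rfl | hlt
      · exact h.2
      · exact h2 j hlt hjm
    · rintro ⟨h1, h2⟩
      exact ⟨by omega, fun j hkj hjm => h2 j (by omega) hjm⟩
  · rw [dif_neg h]
    constructor
    · rintro rfl
      exact ⟨le_refl _, fun j h1 h2 => by omega⟩
    · rintro ⟨h1, h2⟩
      rcases Nat.eq_or_lt_of_le h1 with rfl | hlt
      · rfl
      · exfalso
        apply h
        refine ⟨hlt, ?_⟩
        have := h2 k (le_refl _) hlt
        have hik : ((i : Int) + (k : Int)) = ((i + k : Nat) : Int) := by push_cast; ring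
        rw [hik, PySem.List.pyGet?_natCast, PySem.List.pyGet?_natCast]
        exact this

theorem match_iff_prefix (t p : List Char) (i : Nat) :
    (∀ j, j < p.length → t[i + j]? = p[j]?) ↔ p <+: t.drop i := by
  rw [List.prefix_iff_getElem?]
  constructor
  · intro h j hj
    rw [List.getElem?_drop, h j hj, List.getElem?_eq_getElem hj]
  · intro h j hj
    have hh := h j hj
    rw [List.getElem?_drop] at hh
    rw [hh, List.getElem?_eq_getElem hj]

-- combined: inner loop from 0 reaches m iff P is a prefix of T[i:]
theorem bfWhile_zero_iff (t p : List Char) (i : Nat) :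
    bfWhile t p i 0 = p.length ↔ p <+: t.drop i := by
  rw [bfWhile_eq_iff, ← match_iff_prefix]
  constructor
  · rintro ⟨_, h⟩ j hj
    exact h j (Nat.zero_le _) hj
  · intro h
    exact ⟨Nat.zero_le _, fun j _ hj => h j hj⟩

theorem bfOuter_none (t p : List Char) :
    ∀ l : List Nat, (∀ i ∈ l, ¬ p <+: t.drop i) → bfOuter t p l = -1 := by
  intro l
  induction l with
  | nil => intro _; rfl
  | cons a rest ih =>
    intro h
    rw [bfOuter, if_neg, ih (fun i hi => h i (List.mem_cons_of_mem a hi))]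
    rw [bfWhile_zero_iff]
    exact h a (List.mem_cons_self)

theorem bfOuter_append (t p : List Char) (l1 l2 : List Nat)
    (h : ∀ i ∈ l1, ¬ p <+: t.drop i) :
    bfOuter t p (l1 ++ l2) = bfOuter t p l2 := by
  induction l1 with
  | nil => rfl
  | cons a rest ih =>
    rw [List.cons_append, bfOuter, if_neg, ih (fun i hi => h i (List.mem_cons_of_mem a hi))]
    rw [bfWhile_zero_iff]
    exact h a (List.mem_cons_self)

theorem bfOuter_range_first (t p : List Char) (N j : Nat)
    (hjN : j < N) (hgood : p <+: t.drop j) (hmin : ∀ i < j, ¬ p <+: t.drop i) :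
    bfOuter t p (List.range N) = (j : Int) := by
  have hN : N = j + (N - j) := by omega
  rw [hN, List.range_add, bfOuter_append t p _ _ (fun i hi => hmin i (List.mem_range.mp hi))]
  have hNj : N - j = (N - j - 1) + 1 := by omega
  rw [hNj, List.range_succ_eq_map, List.map_cons, bfOuter,
      if_pos (show bfWhile t p (j + 0) 0 = p.length by
        rw [bfWhile_zero_iff]; simpa using hgood)]
  simp

-- ===== VERDICT (by name: the statement is the Claim_ definition above) =====
theorem brute_force_v2_spec : Claim_equal_brute_force_v2 := by
  intro T P _
  unfold Spec_brute_force_v2 brute_force_v2 brute_force_v2_alt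
  rw [PySem.Str.find_eq]
  set t := T.toList
  set p := P.toList
  by_cases h : PySem.Chars.find t p = -1
  · rw [h]
    apply bfOuter_none
    intro i _ hpre
    have : ∃ j, p <+: t.drop j := ⟨i, hpre⟩
    rw [PySem.Chars.exists_prefix_drop_iff_isIn, PySem.Chars.isIn_iff_infix] at this
    exact (PySem.Chars.find_eq_neg_one_iff t p).mp h this
  · have hpos : 0 ≤ PySem.Chars.find t p := by
      have := PySem.Chars.neg_one_le_find t p
      omega
    obtain ⟨hgood, hmin⟩ := PySem.Chars.find_spec hpos
    set j := (PySem.Chars.find t p).toNat with hj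
    have hjn : p.length ≤ t.length - j := by simpa using hgood.length_le
    have hjt : (j : Int) = PySem.Chars.find t p := Int.toNat_of_nonneg hpos
    have hjle : j ≤ t.length := by
      have := PySem.Chars.find_le_length t p
      omega
    have hjN : j < t.length + 1 - p.length := by
      rcases Nat.eq_zero_or_pos p.length with hp | hp
      · -- empty pattern: find = 0
        have : PySem.Chars.find t p = 0 := by
          have : p = [] := List.eq_nil_of_length_eq_zero hp
          rw [this, PySem.Chars.find_nil]
        omega
      · omega
    rw [bfOuter_range_first t p _ j hjN hgood hmin, hjt]
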